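-- pv_equiv track=rewrite | github.com/WuJunkai2004/swimming_frontend | src/api/generate_api_doc.py | PrevLevel
-- ===== SOURCE A (Python) =====
-- def PrevLevel(url):
--     "优先级"
--     prev = {
--         '/activity': '1',
--         '/leader': '2',
--         '/player': '3',
--         '/admin': '4',
--         '/sport': '5',
--         '/files': '6',
--     }
--     for k, v in prev.items():
--         url = url.replace(k, v)
--     return url
-- ===== SOURCE B (Python) =====
-- def PrevLevel(url):
--     "优先级"
--     table = [('/activity', '1'), ('/leader', '2'), ('/player', '3'),
--              ('/admin', '4'), ('/sport', '5'), ('/files', '6')]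
--     out = []
--     i = 0
--     n = len(url)
--     while i < n:
--         for k, v in table:
--             if url.startswith(k, i):
--                 out.append(v)
--                 i += len(k)
--                 break
--         else:
--             out.append(url[i])
--             i += 1
--     return ''.join(out)
-- ===== Notes on version B (the rewrite author's own statement) =====
-- stated objective: alternative
-- what changed: Replaced six sequential whole-string str.replace passes by a single left-to-right scan that resolves each position with one first-match lookup in the prefix table.
import Mathlib
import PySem

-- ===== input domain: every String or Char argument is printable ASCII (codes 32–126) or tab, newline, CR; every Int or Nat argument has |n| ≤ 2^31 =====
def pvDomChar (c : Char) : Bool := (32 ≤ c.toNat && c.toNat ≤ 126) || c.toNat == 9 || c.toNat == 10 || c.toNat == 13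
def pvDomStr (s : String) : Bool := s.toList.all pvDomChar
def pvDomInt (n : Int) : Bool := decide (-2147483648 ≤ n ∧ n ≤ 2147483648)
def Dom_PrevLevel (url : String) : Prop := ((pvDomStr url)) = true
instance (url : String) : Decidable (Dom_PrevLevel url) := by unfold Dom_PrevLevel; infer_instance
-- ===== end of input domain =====

set_option maxRecDepth 8192


-- B replaces A's six sequential whole-string str.replace passes by one left-to-right scan
-- with a first-match prefix table (objective: alternative single-pass algorithm; return value only, no mutation).

-- ===== PORT A =====
def PrevLevel (url : String) : String :=
  let prev : PySem.Dict String String :=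
    PySem.Dict.ofList [("/activity", "1"), ("/leader", "2"), ("/player", "3"),
                       ("/admin", "4"), ("/sport", "5"), ("/files", "6")]
  prev.items.foldl (fun u kv => PySem.Str.replace u kv.1 kv.2) url

-- ===== PORT B =====
-- the prefix→digit table (B's dict, as key-chars/value pairs)
def pvKeys : List (List Char × Char) :=
  [(['/','a','c','t','i','v','i','t','y'], '1'),
   (['/','l','e','a','d','e','r'], '2'),
   (['/','p','l','a','y','e','r'], '3'),
   (['/','a','d','m','i','n'], '4'),
   (['/','s','p','o','r','t'], '5'),
   (['/','f','i','l','e','s'], '6')]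

-- B's inner `for k, v in prev.items(): if url.startswith(k, i)` loop
def pvMatchKey : List (List Char × Char) → List Char → Option (List Char × Char)
  | [], _ => none
  | (k, v) :: ks, s => if k.isPrefixOf s then some (k, v) else pvMatchKey ks s

-- needed by pvScan's termination proof
theorem pvMatchKey_pos : ∀ (ks : List (List Char × Char)) (s : List Char) (kv : List Char × Char),
    (∀ p ∈ ks, 0 < p.1.length) → pvMatchKey ks s = some kv → 0 < kv.1.length := by
  intro ks
  induction ks with
  | nil => intro s kv _ h; simp [pvMatchKey] at h
  | cons p ks ih =>
    intro s kv hks h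
    obtain ⟨k, v⟩ := p
    simp only [pvMatchKey] at h
    split at h
    · cases h; exact hks (k, v) (by simp)
    · exact ih s kv (fun q hq => hks q (by simp [hq])) h

-- B's while loop: one pass, emit digit and skip the key on a match, else copy the char
def pvScan : List Char → List Char
  | [] => []
  | c :: t =>
    match h : pvMatchKey pvKeys (c :: t) with
    | some kv => kv.2 :: pvScan ((c :: t).drop kv.1.length)
    | none => c :: pvScan t
termination_by s => s.length
decreasing_by
  · have := pvMatchKey_pos pvKeys (c :: t) kv (by decide) h
    simp only [List.length_drop, List.length_cons]; omega
  · simp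

def PrevLevel_alt (url : String) : String := String.ofList (pvScan url.toList)

-- ===== PRECONDITION & SPEC =====
def Spec_PrevLevel (url : String) (out : String) : Prop := out = PrevLevel_alt url
instance (url : String) (out : String) : Decidable (Spec_PrevLevel url out) := by unfold Spec_PrevLevel; infer_instance

-- ===== CLAIM (what is proved, stated in full; the proofs are below) =====
def Claim_equal_PrevLevel : Prop := ∀ (url : String), Dom_PrevLevel url → Spec_PrevLevel url (PrevLevel url)

-- ===== LEMMAS AND PROOFS =====

-- clean structural form of Python str.replace for a nonempty pattern o :: os
def repl (o : Char) (os : List Char) (new : List Char) : List Char → List Char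
  | [] => []
  | c :: t => if (o :: os).isPrefixOf (c :: t) then new ++ repl o os new (t.drop os.length)
              else c :: repl o os new t
termination_by s => s.length
decreasing_by all_goals (simp only [List.length_drop, List.length_cons]; omega)

theorem go_acc (old new : List Char) (fuel : Nat) : ∀ (l acc : List Char),
    PySem.Chars.replace.go old new fuel l acc = acc.reverse ++ PySem.Chars.replace.go old new fuel l [] := by
  induction fuel with
  | zero => intro l acc; simp [PySem.Chars.replace.go]
  | succ n ih =>
    intro l acc
    cases l with
    | nil => simp [PySem.Chars.replace.go]
    | cons c t =>
      simp only [PySem.Chars.replace.go]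
      split
      · rw [ih (List.drop old.length (c :: t)) (new.reverse ++ acc),
            ih (List.drop old.length (c :: t)) (new.reverse ++ [])]
        simp
      · rw [ih t (c :: acc), ih t (c :: [])]
        simp

theorem go_eq_repl (o : Char) (os new : List Char) : ∀ (fuel : Nat) (l : List Char), l.length ≤ fuel →
    PySem.Chars.replace.go (o :: os) new fuel l [] = repl o os new l := by
  intro fuel
  induction fuel with
  | zero =>
    intro l h
    have hl : l = [] := List.eq_nil_of_length_eq_zero (Nat.le_zero.mp h)
    subst hl
    simp [PySem.Chars.replace.go, repl]
  | succ n ih =>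
    intro l h
    cases l with
    | nil => simp [PySem.Chars.replace.go, repl]
    | cons c t =>
      simp only [PySem.Chars.replace.go, repl]
      split
      · rw [go_acc]
        have hd : List.drop (o :: os).length (c :: t) = t.drop os.length := by
          simp [List.drop_succ_cons]
        rw [hd, ih (t.drop os.length) (by simp only [List.length_drop]; simp at h; omega)]
        simp
      · rw [go_acc, ih t (by simp at h; omega)]
        simp

theorem replace_eq_repl (s : List Char) (o : Char) (os new : List Char) :
    PySem.Chars.replace s (o :: os) new = repl o os new s := by
  rw [PySem.Chars.replace]
  simp only [List.isEmpty_cons, Bool.false_eq_true, if_false]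
  exact go_eq_repl o os new s.length s le_rfl

-- no match at the head
theorem r_nomatch (o : Char) (os new : List Char) (c : Char) (t : List Char)
    (h : ¬ (o :: os) <+: (c :: t)) : repl o os new (c :: t) = c :: repl o os new t := by
  rw [repl, if_neg (by simpa [List.isPrefixOf_iff_prefix] using h)]

-- head char differs from the pattern's head
theorem r_head (o : Char) (os new : List Char) (c : Char) (t : List Char)
    (h : c ≠ o) : repl o os new (c :: t) = c :: repl o os new t := by
  exact r_nomatch o os new c t (by intro hp; exact h ((List.cons_prefix_cons.mp hp).1.symm))

-- match at the head
theorem r_match (o : Char) (os new r : List Char) :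
    repl o os new ((o :: os) ++ r) = new ++ repl o os new r := by
  rw [List.cons_append, repl,
      if_pos (by simp [List.isPrefixOf_iff_prefix, List.prefix_append]),
      List.drop_left]

-- push through a block of non-'o' characters
theorem push_letters (o : Char) (os new : List Char) : ∀ (l X : List Char),
    (∀ c ∈ l, c ≠ o) → repl o os new (l ++ X) = l ++ repl o os new X := by
  intro l
  induction l with
  | nil => simp
  | cons c l ih =>
    intro X hl
    rw [List.cons_append, r_head o os new c (l ++ X) (hl c (by simp)), ih X (fun d hd => hl d (by simp [hd]))]
    simp

-- replacing with a single digit d ∉ p cannot create a new occurrence of p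
theorem noNew (o : Char) (os : List Char) (d : Char) : ∀ (t p : List Char),
    d ∉ p → ¬ p <+: t → ¬ p <+: repl o os [d] t := by
  intro t
  induction t with
  | nil => intro p _ h; simpa [repl] using h
  | cons c t ih =>
    intro p hd h
    rw [repl]
    split
    · intro hp
      cases p with
      | nil => exact h (List.nil_prefix)
      | cons q p' =>
        have := (List.cons_prefix_cons.mp hp).1
        exact hd (by simp [this])
    · intro hp
      cases p with
      | nil => exact h (List.nil_prefix)
      | cons q p' =>
        obtain ⟨hq, hp'⟩ := List.cons_prefix_cons.mp hp
        exact ih p' (fun hm => hd (by simp [hm]))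
          (fun hm => h (by subst hq; exact List.cons_prefix_cons.mpr ⟨rfl, hm⟩)) hp'


def l1 : List Char := ['a','c','t','i','v','i','t','y']
def l2 : List Char := ['l','e','a','d','e','r']
def l3 : List Char := ['p','l','a','y','e','r']
def l4 : List Char := ['a','d','m','i','n']
def l5 : List Char := ['s','p','o','r','t']
def l6 : List Char := ['f','i','l','e','s']

-- A's six replace passes, in list-of-chars form
def chainA (s : List Char) : List Char :=
  repl '/' l6 ['6'] (repl '/' l5 ['5'] (repl '/' l4 ['4'] (repl '/' l3 ['3'] (repl '/' l2 ['2'] (repl '/' l1 ['1'] s)))))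

theorem pushK (os new l X : List Char) (h0 : ¬ ('/' :: os) <+: ('/' :: (l ++ X)))
    (hl : ∀ c ∈ l, c ≠ '/') :
    repl '/' os new (('/' :: l) ++ X) = ('/' :: l) ++ repl '/' os new X := by
  rw [List.cons_append, r_nomatch _ _ _ _ _ h0, push_letters _ _ _ _ _ hl]
  simp

theorem scan_key (c : Char) (t : List Char) (kv : List Char × Char)
    (h : pvMatchKey pvKeys (c :: t) = some kv) :
    pvScan (c :: t) = kv.2 :: pvScan ((c :: t).drop kv.1.length) := by
  rw [pvScan]
  split
  · next h' => rw [h] at h'; cases h'; rfl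
  · next h' => rw [h] at h'; cases h'

theorem scan_none (c : Char) (t : List Char)
    (h : pvMatchKey pvKeys (c :: t) = none) :
    pvScan (c :: t) = c :: pvScan t := by
  rw [pvScan]
  split
  · next h' => rw [h] at h'; cases h'
  · rfl

theorem mk1 (r : List Char) : pvMatchKey pvKeys ('/' :: (l1 ++ r)) = some (('/' :: l1), '1') := by
  simp [pvMatchKey, pvKeys, l1, List.isPrefixOf, List.cons_append]
theorem mk2 (r : List Char) : pvMatchKey pvKeys ('/' :: (l2 ++ r)) = some (('/' :: l2), '2') := by
  simp [pvMatchKey, pvKeys, l2, List.isPrefixOf, List.cons_append]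
theorem mk3 (r : List Char) : pvMatchKey pvKeys ('/' :: (l3 ++ r)) = some (('/' :: l3), '3') := by
  simp [pvMatchKey, pvKeys, l3, List.isPrefixOf, List.cons_append]
theorem mk4 (r : List Char) : pvMatchKey pvKeys ('/' :: (l4 ++ r)) = some (('/' :: l4), '4') := by
  simp [pvMatchKey, pvKeys, l4, List.isPrefixOf, List.cons_append]
theorem mk5 (r : List Char) : pvMatchKey pvKeys ('/' :: (l5 ++ r)) = some (('/' :: l5), '5') := by
  simp [pvMatchKey, pvKeys, l5, List.isPrefixOf, List.cons_append]
theorem mk6 (r : List Char) : pvMatchKey pvKeys ('/' :: (l6 ++ r)) = some (('/' :: l6), '6') := by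
  simp [pvMatchKey, pvKeys, l6, List.isPrefixOf, List.cons_append]

theorem mk_none (t : List Char) (h1 : ¬ l1 <+: t) (h2 : ¬ l2 <+: t) (h3 : ¬ l3 <+: t)
    (h4 : ¬ l4 <+: t) (h5 : ¬ l5 <+: t) (h6 : ¬ l6 <+: t) :
    pvMatchKey pvKeys ('/' :: t) = none := by
  simp [pvMatchKey, pvKeys, List.isPrefixOf_iff_prefix,
        l1, l2, l3, l4, l5, l6] at *
  simp [h1, h2, h3, h4, h5, h6]

theorem mk_nonslash (c : Char) (t : List Char) (hc : c ≠ '/') :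
    pvMatchKey pvKeys (c :: t) = none := by
  have hc' : ('/' : Char) ≠ c := fun h => hc h.symm
  simp [pvMatchKey, pvKeys, List.isPrefixOf_iff_prefix, List.cons_prefix_cons, hc']

theorem chain_head (c : Char) (t : List Char) (hc : c ≠ '/') :
    chainA (c :: t) = c :: chainA t := by
  unfold chainA
  rw [r_head _ _ _ _ _ hc, r_head _ _ _ _ _ hc, r_head _ _ _ _ _ hc,
      r_head _ _ _ _ _ hc, r_head _ _ _ _ _ hc, r_head _ _ _ _ _ hc]

theorem case_k1 (r : List Char) : chainA (('/' :: l1) ++ r) = '1' :: chainA r := by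
  have hd : ('1' : Char) ≠ '/' := by decide
  unfold chainA
  rw [r_match '/' l1 ['1'] r]
  simp only [List.singleton_append]
  rw [r_head _ _ _ _ _ hd, r_head _ _ _ _ _ hd, r_head _ _ _ _ _ hd,
      r_head _ _ _ _ _ hd, r_head _ _ _ _ _ hd]

theorem case_k2 (r : List Char) : chainA (('/' :: l2) ++ r) = '2' :: chainA r := by
  have hd : ('2' : Char) ≠ '/' := by decide
  unfold chainA
  rw [pushK l1 ['1'] l2 r (by simp [l1, l2, List.cons_prefix_cons, List.cons_append]) (by simp [l2])]
  rw [r_match '/' l2 ['2'] (repl '/' l1 ['1'] r)]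
  simp only [List.singleton_append]
  rw [r_head _ _ _ _ _ hd, r_head _ _ _ _ _ hd, r_head _ _ _ _ _ hd, r_head _ _ _ _ _ hd]

theorem case_k3 (r : List Char) : chainA (('/' :: l3) ++ r) = '3' :: chainA r := by
  have hd : ('3' : Char) ≠ '/' := by decide
  unfold chainA
  rw [pushK l1 ['1'] l3 r (by simp [l1, l3, List.cons_prefix_cons, List.cons_append]) (by simp [l3])]
  rw [pushK l2 ['2'] l3 _ (by simp [l2, l3, List.cons_prefix_cons, List.cons_append]) (by simp [l3])]
  rw [r_match '/' l3 ['3'] _]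
  simp only [List.singleton_append]
  rw [r_head _ _ _ _ _ hd, r_head _ _ _ _ _ hd, r_head _ _ _ _ _ hd]

theorem case_k4 (r : List Char) : chainA (('/' :: l4) ++ r) = '4' :: chainA r := by
  have hd : ('4' : Char) ≠ '/' := by decide
  unfold chainA
  rw [pushK l1 ['1'] l4 r (by simp [l1, l4, List.cons_prefix_cons, List.cons_append]) (by simp [l4])]
  rw [pushK l2 ['2'] l4 _ (by simp [l2, l4, List.cons_prefix_cons, List.cons_append]) (by simp [l4])]
  rw [pushK l3 ['3'] l4 _ (by simp [l3, l4, List.cons_prefix_cons, List.cons_append]) (by simp [l4])]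
  rw [r_match '/' l4 ['4'] _]
  simp only [List.singleton_append]
  rw [r_head _ _ _ _ _ hd, r_head _ _ _ _ _ hd]

theorem case_k5 (r : List Char) : chainA (('/' :: l5) ++ r) = '5' :: chainA r := by
  have hd : ('5' : Char) ≠ '/' := by decide
  unfold chainA
  rw [pushK l1 ['1'] l5 r (by simp [l1, l5, List.cons_prefix_cons, List.cons_append]) (by simp [l5])]
  rw [pushK l2 ['2'] l5 _ (by simp [l2, l5, List.cons_prefix_cons, List.cons_append]) (by simp [l5])]
  rw [pushK l3 ['3'] l5 _ (by simp [l3, l5, List.cons_prefix_cons, List.cons_append]) (by simp [l5])]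
  rw [pushK l4 ['4'] l5 _ (by simp [l4, l5, List.cons_prefix_cons, List.cons_append]) (by simp [l5])]
  rw [r_match '/' l5 ['5'] _]
  simp only [List.singleton_append]
  rw [r_head _ _ _ _ _ hd]

theorem case_k6 (r : List Char) : chainA (('/' :: l6) ++ r) = '6' :: chainA r := by
  unfold chainA
  rw [pushK l1 ['1'] l6 r (by simp [l1, l6, List.cons_prefix_cons, List.cons_append]) (by simp [l6])]
  rw [pushK l2 ['2'] l6 _ (by simp [l2, l6, List.cons_prefix_cons, List.cons_append]) (by simp [l6])]
  rw [pushK l3 ['3'] l6 _ (by simp [l3, l6, List.cons_prefix_cons, List.cons_append]) (by simp [l6])]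
  rw [pushK l4 ['4'] l6 _ (by simp [l4, l6, List.cons_prefix_cons, List.cons_append]) (by simp [l6])]
  rw [pushK l5 ['5'] l6 _ (by simp [l5, l6, List.cons_prefix_cons, List.cons_append]) (by simp [l6])]
  rw [r_match '/' l6 ['6'] _]
  simp only [List.singleton_append]

theorem chain_slash_no (t : List Char) (h1 : ¬ l1 <+: t) (h2 : ¬ l2 <+: t) (h3 : ¬ l3 <+: t)
    (h4 : ¬ l4 <+: t) (h5 : ¬ l5 <+: t) (h6 : ¬ l6 <+: t) :
    chainA ('/' :: t) = '/' :: chainA t := by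
  unfold chainA
  have e1 : repl '/' l1 ['1'] ('/' :: t) = '/' :: repl '/' l1 ['1'] t :=
    r_nomatch _ _ _ _ _ (by simpa [List.cons_prefix_cons] using h1)
  rw [e1]
  have e2 : repl '/' l2 ['2'] ('/' :: repl '/' l1 ['1'] t)
      = '/' :: repl '/' l2 ['2'] (repl '/' l1 ['1'] t) :=
    r_nomatch _ _ _ _ _ (by
      simpa [List.cons_prefix_cons] using noNew '/' l1 '1' t l2 (by simp [l2]) h2)
  rw [e2]
  have e3 : repl '/' l3 ['3'] ('/' :: repl '/' l2 ['2'] (repl '/' l1 ['1'] t))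
      = '/' :: repl '/' l3 ['3'] (repl '/' l2 ['2'] (repl '/' l1 ['1'] t)) :=
    r_nomatch _ _ _ _ _ (by
      simpa [List.cons_prefix_cons] using
        noNew '/' l2 '2' _ l3 (by simp [l3]) (noNew '/' l1 '1' t l3 (by simp [l3]) h3))
  rw [e3]
  have e4 : repl '/' l4 ['4'] ('/' :: repl '/' l3 ['3'] (repl '/' l2 ['2'] (repl '/' l1 ['1'] t)))
      = '/' :: repl '/' l4 ['4'] (repl '/' l3 ['3'] (repl '/' l2 ['2'] (repl '/' l1 ['1'] t))) :=
    r_nomatch _ _ _ _ _ (by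
      simpa [List.cons_prefix_cons] using
        noNew '/' l3 '3' _ l4 (by simp [l4])
          (noNew '/' l2 '2' _ l4 (by simp [l4]) (noNew '/' l1 '1' t l4 (by simp [l4]) h4)))
  rw [e4]
  have e5 : repl '/' l5 ['5'] ('/' :: repl '/' l4 ['4'] (repl '/' l3 ['3'] (repl '/' l2 ['2'] (repl '/' l1 ['1'] t))))
      = '/' :: repl '/' l5 ['5'] (repl '/' l4 ['4'] (repl '/' l3 ['3'] (repl '/' l2 ['2'] (repl '/' l1 ['1'] t)))) :=
    r_nomatch _ _ _ _ _ (by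
      simpa [List.cons_prefix_cons] using
        noNew '/' l4 '4' _ l5 (by simp [l5])
          (noNew '/' l3 '3' _ l5 (by simp [l5])
            (noNew '/' l2 '2' _ l5 (by simp [l5]) (noNew '/' l1 '1' t l5 (by simp [l5]) h5))))
  rw [e5]
  have e6 : repl '/' l6 ['6'] ('/' :: repl '/' l5 ['5'] (repl '/' l4 ['4'] (repl '/' l3 ['3'] (repl '/' l2 ['2'] (repl '/' l1 ['1'] t)))))
      = '/' :: repl '/' l6 ['6'] (repl '/' l5 ['5'] (repl '/' l4 ['4'] (repl '/' l3 ['3'] (repl '/' l2 ['2'] (repl '/' l1 ['1'] t))))) :=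
    r_nomatch _ _ _ _ _ (by
      simpa [List.cons_prefix_cons] using
        noNew '/' l5 '5' _ l6 (by simp [l6])
          (noNew '/' l4 '4' _ l6 (by simp [l6])
            (noNew '/' l3 '3' _ l6 (by simp [l6])
              (noNew '/' l2 '2' _ l6 (by simp [l6]) (noNew '/' l1 '1' t l6 (by simp [l6]) h6)))))
  rw [e6]

theorem chain_scan : ∀ (n : Nat) (s : List Char), s.length ≤ n → chainA s = pvScan s := by
  intro n
  induction n with
  | zero =>
    intro s h
    have : s = [] := List.eq_nil_of_length_eq_zero (Nat.le_zero.mp h)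
    subst this
    simp [chainA, repl, pvScan]
  | succ n ih =>
    intro s hs
    cases s with
    | nil => simp [chainA, repl, pvScan]
    | cons c t =>
      by_cases hc : c = '/'
      · subst hc
        by_cases h1 : l1 <+: t
        · obtain ⟨r, rfl⟩ := h1
          rw [scan_key '/' (l1 ++ r) _ (mk1 r),
              show ('/' :: (l1 ++ r)) = ('/' :: l1) ++ r from rfl, case_k1 r,
              List.drop_left]
          exact congrArg _ (ih r (by simp [l1] at hs; omega))
        · by_cases h2 : l2 <+: t
          · obtain ⟨r, rfl⟩ := h2
            rw [scan_key '/' (l2 ++ r) _ (mk2 r),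
                show ('/' :: (l2 ++ r)) = ('/' :: l2) ++ r from rfl, case_k2 r,
                List.drop_left]
            exact congrArg _ (ih r (by simp [l2] at hs; omega))
          · by_cases h3 : l3 <+: t
            · obtain ⟨r, rfl⟩ := h3
              rw [scan_key '/' (l3 ++ r) _ (mk3 r),
                  show ('/' :: (l3 ++ r)) = ('/' :: l3) ++ r from rfl, case_k3 r,
                  List.drop_left]
              exact congrArg _ (ih r (by simp [l3] at hs; omega))
            · by_cases h4 : l4 <+: t
              · obtain ⟨r, rfl⟩ := h4
                rw [scan_key '/' (l4 ++ r) _ (mk4 r),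
                    show ('/' :: (l4 ++ r)) = ('/' :: l4) ++ r from rfl, case_k4 r,
                    List.drop_left]
                exact congrArg _ (ih r (by simp [l4] at hs; omega))
              · by_cases h5 : l5 <+: t
                · obtain ⟨r, rfl⟩ := h5
                  rw [scan_key '/' (l5 ++ r) _ (mk5 r),
                      show ('/' :: (l5 ++ r)) = ('/' :: l5) ++ r from rfl, case_k5 r,
                      List.drop_left]
                  exact congrArg _ (ih r (by simp [l5] at hs; omega))
                · by_cases h6 : l6 <+: t
                  · obtain ⟨r, rfl⟩ := h6
                    rw [scan_key '/' (l6 ++ r) _ (mk6 r),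
                        show ('/' :: (l6 ++ r)) = ('/' :: l6) ++ r from rfl, case_k6 r,
                        List.drop_left]
                    exact congrArg _ (ih r (by simp [l6] at hs; omega))
                  · rw [chain_slash_no t h1 h2 h3 h4 h5 h6,
                        scan_none _ _ (mk_none t h1 h2 h3 h4 h5 h6)]
                    exact congrArg _ (ih t (by simp at hs; omega))
      · rw [chain_head c t hc, scan_none _ _ (mk_nonslash c t hc)]
        exact congrArg _ (ih t (by simp at hs; omega))

theorem A_toList (url : String) : (PrevLevel url).toList = chainA url.toList := by
  show (PySem.Str.replace (PySem.Str.replace (PySem.Str.replace (PySem.Str.replace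
        (PySem.Str.replace (PySem.Str.replace url "/activity" "1") "/leader" "2")
        "/player" "3") "/admin" "4") "/sport" "5") "/files" "6").toList = chainA url.toList
  simp only [PySem.Str.toList_replace]
  rw [show ("/activity" : String).toList = '/' :: l1 from rfl,
      show ("/leader" : String).toList = '/' :: l2 from rfl,
      show ("/player" : String).toList = '/' :: l3 from rfl,
      show ("/admin" : String).toList = '/' :: l4 from rfl,
      show ("/sport" : String).toList = '/' :: l5 from rfl,
      show ("/files" : String).toList = '/' :: l6 from rfl]
  simp only [replace_eq_repl]
  rfl

-- ===== VERDICT (by name: the statement is the Claim_ definition above) =====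
theorem PrevLevel_spec : Claim_equal_PrevLevel := by
  intro url _
  unfold Spec_PrevLevel PrevLevel_alt
  apply String.toList_injective
  rw [A_toList, String.toList_ofList]
  exact chain_scan url.toList.length url.toList le_rfl
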